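-- pv_equiv track=rewrite | github.com/Vinodkumar-yerraballi/DATA-STRUCTURE | Bineary_Search/BinaryMatrix.py | Matrix_searching
-- ===== SOURCE A (Python) =====
-- def Matrix_searching(matrix,target):
--     #find the rows of the matrix
--     m=len(matrix)
--     # define a condition when the row will be zero it's return to false
--     if m==0:
--         return False
--     #let's find the number of columns
--     n=len(matrix[0])
--     #find the starting and ending index of the matrix
--     #we take the left index=0
--     # And we find the last index will be multiply the rows and columns substract with -1
--     left,right=0,m*n-1
--     #find the middle number
--     while left<=right:
--         mid=left+(right-left)//2
--         #how to find the middle number in the matix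
--         #find the row_number in the matrix row_number=mid//n it means midle number divided by columns
--         # find the column in the matrix column=mid%n if means mid number divided by column it return the remainder
--         mid_element=matrix[mid//n][mid%n]
--         if target==mid_element:
--             return True
--         elif  target < mid_element:
--             right=mid-1
--         else:
--             left=mid+1
--     return False
-- ===== SOURCE B (Python) =====
-- def Matrix_searching(matrix, target):
--     return any(target in row for row in matrix)
-- ===== Notes on version B (the rewrite author's own statement) =====
-- stated objective: idiomatic
-- what changed: B replaces the binary search over the flattened index range with the idiomatic one-liner any(target in row for row in matrix), a plain row-by-row membership scan that gives the same boolean on rectangular row-major-sorted matrices.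
-- outside the precondition, e.g. on Matrix_searching([[0, 5], [1, 2]], 1): A returns False, B returns True; on Matrix_searching([[], [1]], 1): A returns False, B returns True; on Matrix_searching([[1, 2], [3]], 5): A raises IndexError, B returns False
import Mathlib
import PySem

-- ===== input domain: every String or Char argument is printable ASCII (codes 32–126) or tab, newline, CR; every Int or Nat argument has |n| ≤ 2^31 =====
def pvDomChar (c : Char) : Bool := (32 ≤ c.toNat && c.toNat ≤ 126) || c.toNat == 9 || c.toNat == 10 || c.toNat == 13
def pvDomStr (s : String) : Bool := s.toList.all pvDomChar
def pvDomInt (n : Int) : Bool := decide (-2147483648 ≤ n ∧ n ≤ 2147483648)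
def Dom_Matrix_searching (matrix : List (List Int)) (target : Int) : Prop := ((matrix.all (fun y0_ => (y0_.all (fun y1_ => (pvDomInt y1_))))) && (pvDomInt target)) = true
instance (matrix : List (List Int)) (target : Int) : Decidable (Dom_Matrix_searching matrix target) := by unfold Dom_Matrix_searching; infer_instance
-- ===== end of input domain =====

-- B replaces A's flat-index binary search with the idiomatic row-by-row membership scan
-- any(target in row for row in matrix) (same boolean on rectangular row-major-sorted matrices).


-- ===== PORT A =====
-- while left<=right loop of A; `none` from pyGet? = Python IndexError (outside Pre_)
def pvAGo (matrix : List (List Int)) (target : Int) (n : Int) (left right : Int) : Bool :=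
  if _h : left ≤ right then
    let mid := left + PySem.Int.floordiv (right - left) 2
    match (PySem.List.pyGet? matrix (PySem.Int.floordiv mid n)).bind
        (fun row => PySem.List.pyGet? row (PySem.Int.mod mid n)) with
    | none => false
    | some mid_element =>
      if target == mid_element then true
      else if target < mid_element then pvAGo matrix target n left (mid - 1)
      else pvAGo matrix target n (mid + 1) right
  else false
termination_by (right + 1 - left).toNat
decreasing_by
  all_goals
    rw [PySem.Int.floordiv_eq_ediv_of_pos (by omega : (0:Int) < 2)]
    omega

def Matrix_searching (matrix : List (List Int)) (target : Int) : Bool :=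
  let m := matrix.length
  if m == 0 then false
  else
    let n := (matrix.headD []).length
    pvAGo matrix target (n : Int) 0 ((m : Int) * (n : Int) - 1)

-- ===== PORT B =====
-- any(target in row for row in matrix)
def Matrix_searching_alt (matrix : List (List Int)) (target : Int) : Bool :=
  matrix.any (fun row => row.contains target)

-- ===== PRECONDITION & SPEC =====
-- Pre_ excludes non-rectangular matrices (on which A can raise IndexError, or — with a short
-- first row — A's flat indexing silently skips elements B's full scan sees) and unsorted
-- rectangular matrices that do contain the target, where the binary search's answer is an
-- accident of its probe order; it keeps rectangular row-major-sorted matrices and rectangular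
-- matrices not containing the target (both programs report True only on a witnessed equality).
def Pre_Matrix_searching (matrix : List (List Int)) (target : Int) : Prop :=
  (∀ row ∈ matrix, row.length = (matrix.headD []).length) ∧
  (List.Pairwise (· ≤ ·) matrix.flatten ∨ target ∉ matrix.flatten)

instance (matrix : List (List Int)) (target : Int) : Decidable (Pre_Matrix_searching matrix target) := by
  unfold Pre_Matrix_searching; infer_instance

def pvWitness_Matrix_searching : List (List Int) × Int := ([[1, 2], [3, 4]], 3)

def Spec_Matrix_searching (matrix : List (List Int)) (target : Int) (out : Bool) : Prop := out = Matrix_searching_alt matrix target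
instance (matrix : List (List Int)) (target : Int) (out : Bool) : Decidable (Spec_Matrix_searching matrix target out) := by unfold Spec_Matrix_searching; infer_instance

-- ===== CLAIM (what is proved, stated in full; the proofs are below) =====
def Claim_equal_Matrix_searching : Prop := ∀ (matrix : List (List Int)) (target : Int), Dom_Matrix_searching matrix target → Pre_Matrix_searching matrix target → Spec_Matrix_searching matrix target (Matrix_searching matrix target)

-- ===== LEMMAS AND PROOFS =====

-- a Pairwise-sorted list is monotone in its indices
lemma pvSortedLe {l : List Int} (hs : List.Pairwise (· ≤ ·) l) {i j : Nat}
    (hij : i ≤ j) (hj : j < l.length) : l[i]'(by omega) ≤ l[j] := by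
  rcases Nat.lt_or_eq_of_le hij with h | h
  · exact (List.pairwise_iff_getElem.mp hs) i j (by omega) hj h
  · subst h; exact le_refl _

-- length of the flattening of a rectangular matrix
lemma pvFlatLen (matrix : List (List Int)) (n : Nat)
    (hrect : ∀ row ∈ matrix, row.length = n) :
    matrix.flatten.length = matrix.length * n := by
  induction matrix with
  | nil => simp
  | cons row rest ih =>
    simp only [List.flatten_cons, List.length_append, List.length_cons]
    rw [hrect row (by simp), ih (fun r hr => hrect r (by simp [hr]))]
    ring

-- indexing the flattening of a rectangular matrix
lemma pvFlatGet (matrix : List (List Int)) (n : Nat)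
    (hrect : ∀ row ∈ matrix, row.length = n) (i j : Nat)
    (hi : i < matrix.length) (hj : j < n) :
    matrix.flatten[i * n + j]? = (matrix[i]'hi)[j]? := by
  induction matrix generalizing i with
  | nil => simp at hi
  | cons row rest ih =>
    have hrow : row.length = n := hrect row (by simp)
    cases i with
    | zero =>
      simp only [Nat.zero_mul, Nat.zero_add, List.flatten_cons, List.getElem_cons_zero]
      rw [List.getElem?_append_left (by omega)]
    | succ i' =>
      have hi' : i' < rest.length := by simpa using hi
      have : (i' + 1) * n + j = row.length + (i' * n + j) := by rw [hrow]; ring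
      simp only [List.flatten_cons, this, List.getElem_cons_succ]
      rw [List.getElem?_append_right (by omega)]
      simp only [Nat.add_sub_cancel_left]
      exact ih (fun r hr => hrect r (by simp [hr])) i' hi'

-- correctness of A's binary-search loop: it answers membership of target in flatten[left..right]
lemma pvAGo_iff (matrix : List (List Int)) (target : Int) (n : Nat)
    (hrect : ∀ row ∈ matrix, row.length = n)
    (hs : List.Pairwise (· ≤ ·) matrix.flatten) :
    ∀ fuel : Nat, ∀ left right : Int,
      (right + 1 - left).toNat ≤ fuel → 0 ≤ left → right < (matrix.length : Int) * n →
      (pvAGo matrix target (n : Int) left right = true ↔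
        ∃ k : Nat, left ≤ (k : Int) ∧ (k : Int) ≤ right ∧ matrix.flatten[k]? = some target) := by
  intro fuel
  induction fuel with
  | zero =>
    intro left right hf hl _
    rw [pvAGo]
    have hlr : ¬ left ≤ right := by omega
    simp only [hlr, dite_false, Bool.false_eq_true, false_iff, not_exists]
    rintro k ⟨h1, h2, -⟩; omega
  | succ fuel ih =>
    intro left right hf hl hr
    rw [pvAGo]
    by_cases hlr : left ≤ right
    · rw [dif_pos hlr]
      have hflen : matrix.flatten.length = matrix.length * n := pvFlatLen matrix n hrect
      have hn : 0 < (n : Int) := by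
        by_contra hn0
        have : (n : Int) = 0 := by omega
        rw [this, mul_zero] at hr; omega
      have hmid2 : PySem.Int.floordiv (right - left) 2 = (right - left) / 2 :=
        PySem.Int.floordiv_eq_ediv_of_pos (by omega)
      set mid := left + PySem.Int.floordiv (right - left) 2 with hmiddef
      dsimp only []
      have hmidb : left ≤ mid ∧ mid ≤ right := by rw [hmiddef, hmid2]; omega
      have hdiv : PySem.Int.floordiv mid (n : Int) = mid / (n : Int) :=
        PySem.Int.floordiv_eq_ediv_of_pos hn
      have hmod : PySem.Int.mod mid (n : Int) = mid % (n : Int) :=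
        PySem.Int.mod_eq_emod_of_pos hn
      set ri := mid / (n : Int) with hridef
      set ci := mid % (n : Int) with hcidef
      have hci0 : 0 ≤ ci := Int.emod_nonneg mid (by omega)
      have hcin : ci < (n : Int) := Int.emod_lt_of_pos mid hn
      have hrid : ri * (n : Int) + ci = mid := by
        rw [hridef, hcidef]; exact Int.ediv_mul_add_emod mid (n : Int)
      have hri0 : 0 ≤ ri := Int.ediv_nonneg (by omega) (by omega)
      have hrim : ri < (matrix.length : Int) := by
        by_contra hcon
        have : (matrix.length : Int) * n ≤ ri * n := by
          apply mul_le_mul_of_nonneg_right (by omega) (by omega)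
        omega
      have hget1 : PySem.List.pyGet? matrix ri = some (matrix[ri.toNat]'(by omega)) := by
        rw [PySem.List.pyGet?_of_nonneg _ hri0, List.getElem?_eq_getElem (by omega)]
      have hrowlen : (matrix[ri.toNat]'(by omega)).length = n :=
        hrect _ (List.getElem_mem _)
      have hget2 : PySem.List.pyGet? (matrix[ri.toNat]'(by omega)) ci =
          (matrix[ri.toNat]'(by omega))[ci.toNat]? := PySem.List.pyGet?_of_nonneg _ hci0
      have hmidnn : 0 ≤ mid := by omega
      have hmidtn : ri.toNat * n + ci.toNat = mid.toNat := by
        have hc : ((ri.toNat * n + ci.toNat : Nat) : Int) = mid := by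
          push_cast
          rw [Int.toNat_of_nonneg hri0, Int.toNat_of_nonneg hci0]
          exact hrid
        omega
      have hmidlt : mid.toNat < matrix.flatten.length := by rw [hflen]; omega
      have hflat : matrix.flatten[mid.toNat]? =
          (matrix[ri.toNat]'(by omega))[ci.toNat]? := by
        rw [← hmidtn]
        exact pvFlatGet matrix n hrect ri.toNat ci.toNat (by omega) (by omega)
      have hflatsome : matrix.flatten[mid.toNat]? =
          some (matrix.flatten[mid.toNat]'hmidlt) := List.getElem?_eq_getElem hmidlt
      rw [hdiv, hmod, hget1]
      simp only [Option.bind_some]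
      rw [hget2, ← hflat, hflatsome]
      set me := matrix.flatten[mid.toNat]'hmidlt with hmedef
      by_cases heq : target = me
      · simp only [heq, beq_self_eq_true, if_true, true_iff]
        exact ⟨mid.toNat, by omega, by omega, by simp [hflatsome]⟩
      · have hbeq : (target == me) = false := by simp [heq]
        simp only [hbeq, Bool.false_eq_true, if_false]
        by_cases hlt : target < me
        · simp only [hlt, if_true]
          rw [ih left (mid - 1) (by omega) hl (by omega)]
          constructor
          · rintro ⟨k, h1, h2, h3⟩; exact ⟨k, h1, by omega, h3⟩
          · rintro ⟨k, h1, h2, h3⟩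
            refine ⟨k, h1, ?_, h3⟩
            by_contra hk
            have hkm : mid.toNat ≤ k := by omega
            have hklt : k < matrix.flatten.length := by rw [hflen]; omega
            have := pvSortedLe hs hkm hklt
            rw [List.getElem?_eq_getElem hklt] at h3
            have : me ≤ matrix.flatten[k]'hklt := this
            simp only [Option.some.injEq] at h3
            omega
        · simp only [hlt, if_false]
          have hgt : me < target := by omega
          rw [ih (mid + 1) right (by omega) (by omega) hr]
          constructor
          · rintro ⟨k, h1, h2, h3⟩; exact ⟨k, by omega, h2, h3⟩
          · rintro ⟨k, h1, h2, h3⟩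
            refine ⟨k, ?_, h2, h3⟩
            by_contra hk
            have hkm : k ≤ mid.toNat := by omega
            have hklt : k < matrix.flatten.length := by rw [hflen]; omega
            have := pvSortedLe hs hkm hmidlt
            rw [List.getElem?_eq_getElem hklt] at h3
            simp only [Option.some.injEq] at h3
            omega
    · simp only [hlr, dite_false, Bool.false_eq_true, false_iff, not_exists]
      rintro k ⟨h1, h2, -⟩; omega

-- if target occurs nowhere in the matrix, A's loop can only ever answer false
lemma pvAGo_notin (matrix : List (List Int)) (target : Int)
    (h : target ∉ matrix.flatten) :
    ∀ fuel : Nat, ∀ n left right : Int, (right + 1 - left).toNat ≤ fuel →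
      pvAGo matrix target n left right = false := by
  intro fuel
  induction fuel with
  | zero =>
    intro n left right hf
    rw [pvAGo, dif_neg (by omega : ¬ left ≤ right)]
  | succ fuel ih =>
    intro n left right hf
    rw [pvAGo]
    by_cases hlr : left ≤ right
    · rw [dif_pos hlr]
      have hmid2 : PySem.Int.floordiv (right - left) 2 = (right - left) / 2 :=
        PySem.Int.floordiv_eq_ediv_of_pos (by omega)
      set mid := left + PySem.Int.floordiv (right - left) 2 with hmiddef
      dsimp only []
      have hmidb : left ≤ mid ∧ mid ≤ right := by rw [hmiddef, hmid2]; omega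
      cases hb : (PySem.List.pyGet? matrix (PySem.Int.floordiv mid n)).bind
          (fun row => PySem.List.pyGet? row (PySem.Int.mod mid n)) with
      | none => rfl
      | some e =>
        rcases Option.bind_eq_some_iff.mp hb with ⟨row, h1, h2⟩
        have hrow : row ∈ matrix := PySem.List.mem_of_pyGet?_eq_some _ h1
        have he : e ∈ matrix.flatten :=
          List.mem_flatten.mpr ⟨row, hrow, PySem.List.mem_of_pyGet?_eq_some _ h2⟩
        have hne : target ≠ e := fun hc => h (hc ▸ he)
        have hbeq : (target == e) = false := by simp [hne]
        simp only [hbeq, Bool.false_eq_true, if_false]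
        by_cases hlt : target < e
        · simp only [hlt, if_true]
          exact ih n left (mid - 1) (by omega)
        · simp only [hlt, if_false]
          exact ih n (mid + 1) right (by omega)
    · rw [dif_neg hlr]

-- B's scan answers membership of target in the flattened matrix
lemma pvAlt_iff (matrix : List (List Int)) (target : Int) :
    Matrix_searching_alt matrix target = true ↔ target ∈ matrix.flatten := by
  simp [Matrix_searching_alt, List.any_eq_true, List.mem_flatten]

-- ===== VERDICT (by name: the statement is the Claim_ definition above) =====
theorem Matrix_searching_spec : Claim_equal_Matrix_searching := by
  intro matrix target _ hpre
  unfold Spec_Matrix_searching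
  obtain ⟨hrect, hcase⟩ := hpre
  set n := (matrix.headD []).length with hn
  rw [Bool.eq_iff_iff, pvAlt_iff]
  unfold Matrix_searching
  by_cases hm : matrix.length = 0
  · have : matrix = [] := List.length_eq_zero_iff.mp hm
    subst this; simp
  · have hm' : (matrix.length == 0) = false := by simp [hm]
    simp only [hm', Bool.false_eq_true, if_false]
    have hflen : matrix.flatten.length = matrix.length * n := pvFlatLen matrix n hrect
    rcases hcase with hs | hnotin
    · rw [pvAGo_iff matrix target n hrect hs
        (((matrix.length : Int) * n - 1) + 1 - 0).toNat 0 ((matrix.length : Int) * n - 1)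
        (le_refl _) (le_refl 0) (by omega)]
      constructor
      · rintro ⟨k, h1, h2, h3⟩
        exact List.mem_of_getElem? h3
      · intro hmem
        rcases List.mem_iff_getElem?.mp hmem with ⟨k, hk⟩
        have hklen : k < matrix.flatten.length := by
          by_contra hc
          rw [List.getElem?_eq_none (by omega)] at hk
          simp at hk
        refine ⟨k, by omega, ?_, hk⟩
        rw [hflen] at hklen
        omega
    · rw [pvAGo_notin matrix target hnotin _ _ 0 ((matrix.length : Int) * n - 1) (le_refl _)]
      simp [hnotin]
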